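-- pv_equiv track=rewrite | github.com/xianfeng92/finetune-lab | training/data_pipeline/import_car_bench.py | infer_risk
-- ===== SOURCE A (Python) =====
-- DOMAIN_RISK = {
--     "hvac": "low",
--     "seat": "low",
--     "window": "medium",
--     "door": "high",
-- }
--
-- RISK_LEVELS = {
--     "low": 0,
--     "medium": 1,
--     "high": 2,
-- }
--
-- def infer_risk(domains: list[str], vehicle_state: dict) -> str:
--     highest = "low"
--     for domain in domains:
--         candidate = DOMAIN_RISK.get(domain, "low")
--         if RISK_LEVELS[candidate] > RISK_LEVELS[highest]:
--             highest = candidate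
--     if vehicle_state["power_state"] == "driving" and highest == "medium":
--         return "high"
--     return highest
-- ===== SOURCE B (Python) =====
-- DOMAIN_RISK = {
--     "hvac": "low",
--     "seat": "low",
--     "window": "medium",
--     "door": "high",
-- }
--
-- def infer_risk(domains: list[str], vehicle_state: dict) -> str:
--     driving = vehicle_state["power_state"] == "driving"
--     risks = {DOMAIN_RISK.get(d, "low") for d in domains}
--     if "high" in risks:
--         return "high"
--     if "medium" in risks:
--         return "high" if driving else "medium"
--     return "low"
-- ===== Notes on version B (the rewrite author's own statement) =====
-- stated objective: simpler
-- what changed: Replaces the numeric-level running-max loop over RISK_LEVELS with building the set of risk labels present and a priority-ordered check (high, then medium with the driving escalation, else low), dropping the RISK_LEVELS table entirely.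
import Mathlib
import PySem

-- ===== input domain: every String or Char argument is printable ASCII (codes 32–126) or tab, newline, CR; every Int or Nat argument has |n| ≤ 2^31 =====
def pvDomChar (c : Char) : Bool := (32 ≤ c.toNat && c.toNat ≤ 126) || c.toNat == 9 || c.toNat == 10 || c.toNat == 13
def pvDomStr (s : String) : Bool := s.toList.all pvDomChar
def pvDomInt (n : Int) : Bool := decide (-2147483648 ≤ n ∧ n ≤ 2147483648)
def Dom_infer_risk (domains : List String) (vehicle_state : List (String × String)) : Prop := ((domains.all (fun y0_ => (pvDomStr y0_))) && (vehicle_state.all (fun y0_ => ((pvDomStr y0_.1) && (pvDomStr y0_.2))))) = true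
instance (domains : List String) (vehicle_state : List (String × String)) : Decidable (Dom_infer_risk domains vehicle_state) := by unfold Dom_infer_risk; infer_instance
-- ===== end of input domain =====

-- B replaces the numeric running-max loop with a set of present risk labels and a
-- priority-ordered check (objective: simpler — no RISK_LEVELS table needed).

-- ===== PORT A =====
def DOMAIN_RISK : PySem.Dict String String :=
  PySem.Dict.ofList [("hvac", "low"), ("seat", "low"), ("window", "medium"), ("door", "high")]

def RISK_LEVELS : PySem.Dict String Int :=
  PySem.Dict.ofList [("low", 0), ("medium", 1), ("high", 2)]

def infer_risk (domains : List String) (vehicle_state : List (String × String)) : String :=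
  let highest := domains.foldl (fun highest domain =>
    let candidate := DOMAIN_RISK.getD domain "low"
    if RISK_LEVELS.getD candidate 0 > RISK_LEVELS.getD highest 0 then candidate else highest) "low"
  -- vehicle_state["power_state"], total via getD: Pre_ requires the key to be present (Python raises KeyError otherwise)
  let power := (PySem.Dict.mk vehicle_state).getD "power_state" ""
  if power == "driving" && highest == "medium" then "high" else highest

-- ===== PORT B =====
def infer_risk_alt (domains : List String) (vehicle_state : List (String × String)) : String :=
  let driving := (PySem.Dict.mk vehicle_state).getD "power_state" "" == "driving"
  let risks : PySem.Set String := PySem.Set.ofList (domains.map (fun d => DOMAIN_RISK.getD d "low"))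
  if PySem.Set.contains risks "high" then "high"
  else if PySem.Set.contains risks "medium" then (if driving then "high" else "medium")
  else "low"

-- ===== PRECONDITION & SPEC =====
-- Pre_ excludes inputs whose vehicle_state lacks the "power_state" key, on which Python A raises KeyError.
def Pre_infer_risk (domains : List String) (vehicle_state : List (String × String)) : Prop :=
  "power_state" ∈ vehicle_state.map Prod.fst
instance (domains : List String) (vehicle_state : List (String × String)) : Decidable (Pre_infer_risk domains vehicle_state) := by unfold Pre_infer_risk; infer_instance
def pvWitness_infer_risk : List String × (List (String × String)) := (["door", "hvac"], [("power_state", "parked")])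

def Spec_infer_risk (domains : List String) (vehicle_state : List (String × String)) (out : String) : Prop := out = infer_risk_alt domains vehicle_state
instance (domains : List String) (vehicle_state : List (String × String)) (out : String) : Decidable (Spec_infer_risk domains vehicle_state out) := by unfold Spec_infer_risk; infer_instance

-- ===== CLAIM (what is proved, stated in full; the proofs are below) =====
def Claim_equal_infer_risk : Prop := ∀ (domains : List String) (vehicle_state : List (String × String)), Dom_infer_risk domains vehicle_state → Pre_infer_risk domains vehicle_state → Spec_infer_risk domains vehicle_state (infer_risk domains vehicle_state)

-- ===== LEMMAS AND PROOFS =====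

-- every domain's risk label is one of the three levels
theorem riskOf_cases (d : String) :
    DOMAIN_RISK.getD d "low" = "low" ∨ DOMAIN_RISK.getD d "low" = "medium" ∨ DOMAIN_RISK.getD d "low" = "high" := by
  simp only [DOMAIN_RISK, PySem.Dict.ofList, PySem.Dict.update, List.foldl_cons, List.foldl_nil,
    PySem.Dict.getD_insert, PySem.Dict.getD_empty]
  split_ifs <;> simp

-- characterisation of A's running-max loop by which labels occur in the list
theorem foldl_char (ds : List String) (h : String)
    (hh : h = "low" ∨ h = "medium" ∨ h = "high") :
    ds.foldl (fun highest domain =>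
      let candidate := DOMAIN_RISK.getD domain "low"
      if RISK_LEVELS.getD candidate 0 > RISK_LEVELS.getD highest 0 then candidate else highest) h =
    if (ds.map (fun d => DOMAIN_RISK.getD d "low")).contains "high" ∨ h = "high" then "high"
    else if (ds.map (fun d => DOMAIN_RISK.getD d "low")).contains "medium" ∨ h = "medium" then "medium"
    else h := by
  induction ds generalizing h with
  | nil => rcases hh with hh | hh | hh <;> subst hh <;> simp
  | cons d ds ih =>
    simp only [List.foldl_cons, List.map_cons, List.contains_cons]
    rcases riskOf_cases d with hd | hd | hd <;>
      rcases hh with hh | hh | hh <;>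
      subst hh <;> rw [hd] <;>
      rw [ih _ (by decide)] <;>
      norm_num [RISK_LEVELS, PySem.Dict.ofList, PySem.Dict.update, PySem.Dict.getD_insert, PySem.Dict.getD_empty] <;>
      cases hC1 : (List.map (fun d => DOMAIN_RISK.getD d "low") ds).contains "high" <;>
      cases hC2 : (List.map (fun d => DOMAIN_RISK.getD d "low") ds).contains "medium" <;>
      simp_all

theorem set_contains_ofList (y : String) (xs : List String) :
    PySem.Set.contains (PySem.Set.ofList xs) y = xs.contains y := by
  simp [PySem.Set.contains, PySem.Set.mem_ofList]

theorem infer_risk_eq (domains : List String) (vehicle_state : List (String × String)) :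
    infer_risk domains vehicle_state = infer_risk_alt domains vehicle_state := by
  simp only [infer_risk, infer_risk_alt]
  rw [foldl_char _ _ (by decide), set_contains_ofList, set_contains_ofList]
  cases hC1 : (List.map (fun d => DOMAIN_RISK.getD d "low") domains).contains "high" <;>
    cases hC2 : (List.map (fun d => DOMAIN_RISK.getD d "low") domains).contains "medium" <;>
    by_cases hD : (PySem.Dict.mk vehicle_state).getD "power_state" "" = "driving" <;>
    simp_all

-- ===== VERDICT (by name: the statement is the Claim_ definition above) =====
theorem infer_risk_spec : Claim_equal_infer_risk := by
  intro domains vehicle_state _ _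
  unfold Spec_infer_risk
  exact infer_risk_eq domains vehicle_state
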